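-- pv_equiv track=rewrite | github.com/Randdalf/aoc19 | d04.py | is_true_password
-- ===== SOURCE A (Python) =====
-- def is_true_password(number):
--     digits = [int(d) for d in str(number)]
--
--     for i in range(len(digits)-1):
--         if digits[i] > digits[i+1]:
--             return False
--
--     prev = None
--     count = 0
--     for d in digits:
--         if d == prev:
--             count += 1
--         else:
--             if count == 2:
--                 return True
--             prev = d
--             count = 1
--
--     return count == 2
-- ===== SOURCE B (Python) =====
-- def is_true_password(number):
--     digits = [int(d) for d in str(number)]
--     if digits != sorted(digits):
--         return False
--     return any(digits.count(d) == 2 for d in digits)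
-- ===== Notes on version B (the rewrite author's own statement) =====
-- stated objective: simpler
-- what changed: The index loop over adjacent pairs and the prev/count run-tracking state machine are replaced by a sorted-equality check plus a direct occurrence-count test (in a non-decreasing digit list each digit's total count equals its run length).
import Mathlib
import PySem

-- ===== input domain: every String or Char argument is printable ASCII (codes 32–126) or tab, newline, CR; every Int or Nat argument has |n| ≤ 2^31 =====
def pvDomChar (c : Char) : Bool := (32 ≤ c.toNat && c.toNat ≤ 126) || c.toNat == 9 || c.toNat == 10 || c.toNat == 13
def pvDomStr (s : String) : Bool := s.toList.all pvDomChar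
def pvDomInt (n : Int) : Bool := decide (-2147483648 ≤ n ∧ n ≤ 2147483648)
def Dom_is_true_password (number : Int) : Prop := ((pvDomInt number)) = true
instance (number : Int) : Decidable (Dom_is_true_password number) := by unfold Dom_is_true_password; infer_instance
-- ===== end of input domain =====

-- B replaces A's adjacent-pair index loop and prev/count run-tracking state machine by a
-- sorted-equality check plus a direct occurrence-count test (objective: simpler).

-- ===== PORT A =====
-- `[int(d) for d in str(number)]`, shared digit extraction of both Pythons.
-- PySem.Int.ofStr? is none where Python's int() raises ValueError (the '-' of a negative
-- number); the `.getD 0` is unreachable under Pre_ (0 ≤ number ⇒ every char is a digit).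
def pvDigits (number : Int) : List Int :=
  (PySem.Int.toStr number).toList.map (fun d => (PySem.Int.ofStr? (String.ofList [d])).getD 0)

-- the second for-loop of A with its early `return True`: prev is None or some digit
def runA : List Int → Option Int → Int → Bool
  | [], _, count => count == 2
  | d :: rest, prev, count =>
    if some d == prev then runA rest prev (count + 1)
    else if count == 2 then true
    else runA rest (some d) 1

def is_true_password (number : Int) : Bool :=
  let digits := pvDigits number
  if (PySem.List.pyRange 0 (PySem.List.len digits - 1)).any
      (fun i => decide (PySem.List.pyGetD digits i 0 > PySem.List.pyGetD digits (i + 1) 0))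
  then false
  else runA digits none 0

-- ===== PORT B =====
def is_true_password_alt (number : Int) : Bool :=
  let digits := pvDigits number
  if digits ≠ PySem.List.sorted digits (fun x => x) then false
  else digits.any (fun d => PySem.List.count digits d == 2)

-- ===== PRECONDITION & SPEC =====
-- Pre_ excludes negative numbers: there str(number) starts with '-' and int('-') raises
-- ValueError in A (and in B alike).
def Pre_is_true_password (number : Int) : Prop := 0 ≤ number
instance (number : Int) : Decidable (Pre_is_true_password number) := by unfold Pre_is_true_password; infer_instance
def pvWitness_is_true_password : Int := 111122

def Spec_is_true_password (number : Int) (out : Bool) : Prop := out = is_true_password_alt number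
instance (number : Int) (out : Bool) : Decidable (Spec_is_true_password number out) := by unfold Spec_is_true_password; infer_instance

-- ===== CLAIM (what is proved, stated in full; the proofs are below) =====
def Claim_equal_is_true_password : Prop := ∀ (number : Int), Dom_is_true_password number → Pre_is_true_password number → Spec_is_true_password number (is_true_password number)

-- ===== LEMMAS AND PROOFS =====

-- A's first loop returns no False exactly when the digits are non-decreasing
lemma gateA_eq_false_iff (ds : List Int) :
    (((PySem.List.pyRange 0 (PySem.List.len ds - 1)).any
      (fun i => decide (PySem.List.pyGetD ds i 0 > PySem.List.pyGetD ds (i + 1) 0))) = false)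
      ↔ ds.Pairwise (· ≤ ·) := by
  rw [← List.isChain_iff_pairwise, List.isChain_iff_getElem]
  simp only [List.any_eq_false, PySem.List.len_eq, PySem.List.mem_pyRange_one,
    decide_eq_true_eq, and_imp, not_lt]
  constructor
  · intro h i hi
    have hx := h (i : Int) (by omega) (by omega)
    have e : ((i : Int) + 1) = ((i + 1 : Nat) : Int) := by push_cast; ring
    rw [e] at hx
    simp only [PySem.List.pyGetD_natCast] at hx
    rw [List.getD_eq_getElem ds 0 (by omega), List.getD_eq_getElem ds 0 (by omega)] at hx
    exact hx
  · intro h x hx0 hx1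
    obtain ⟨n, rfl⟩ : ∃ n : Nat, x = (n : Int) := ⟨x.toNat, by omega⟩
    have e : ((n : Int) + 1) = ((n + 1 : Nat) : Int) := by push_cast; ring
    rw [e]
    simp only [PySem.List.pyGetD_natCast]
    rw [List.getD_eq_getElem ds 0 (by omega), List.getD_eq_getElem ds 0 (by omega)]
    exact h n (by omega)

-- B's gate: stable sort leaves a list unchanged iff it is non-decreasing
lemma sortedGate (ds : List Int) :
    PySem.List.sorted ds (fun x => x) = ds ↔ ds.Pairwise (· ≤ ·) := by
  constructor
  · intro h
    have hp := PySem.List.sorted_pairwise ds (fun x => x)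
    rw [h] at hp
    exact hp
  · intro h
    exact PySem.List.sorted_eq_self_of_pairwise ds (fun x => x) h

-- generic cons-unfolding of "some element occurs exactly twice"
lemma count2_cons (d : Int) (rest : List Int) :
    (∃ v ∈ d :: rest, (d :: rest).count v = 2)
    ↔ (rest.count d + 1 = 2 ∨ ∃ v ∈ rest, v ≠ d ∧ rest.count v = 2) := by
  constructor
  · rintro ⟨v, hv, hc⟩
    rcases eq_or_ne v d with rfl | hne
    · left
      rw [List.count_cons_self] at hc
      omega
    · right
      rcases List.mem_cons.mp hv with h | h
      · exact absurd h hne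
      · refine ⟨v, h, hne, ?_⟩
        rw [List.count_cons, if_neg (by simpa using Ne.symm hne)] at hc
        omega
  · rintro (h | ⟨v, hv, hne, hc⟩)
    · exact ⟨d, List.mem_cons_self, by rw [List.count_cons_self]; omega⟩
    · refine ⟨v, List.mem_cons_of_mem _ hv, ?_⟩
      rw [List.count_cons, if_neg (by simpa using Ne.symm hne)]
      omega

-- invariant of A's run machine on a non-decreasing list whose elements all dominate prev:
-- count holds the occurrences of prev seen so far, which is ALL of them
lemma runA_inv (ds : List Int) (p c : Int) (hs : ds.Pairwise (· ≤ ·))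
    (hlb : ∀ x ∈ ds, p ≤ x) :
    runA ds (some p) c =
      decide (((ds.count p : Int) + c = 2) ∨ ∃ v ∈ ds, v ≠ p ∧ ds.count v = 2) := by
  induction ds generalizing p c with
  | nil =>
    simp only [runA]
    rw [Bool.eq_iff_iff]
    simp
  | cons d rest ih =>
    rw [List.pairwise_cons] at hs
    by_cases hdp : d = p
    · subst hdp
      rw [runA, if_pos (by simp)]
      rw [ih d (c + 1) hs.2 (fun x hx => hlb x (List.mem_cons_of_mem _ hx))]
      rw [decide_eq_decide]
      constructor
      · rintro (h | ⟨v, hv, hvd, hc⟩)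
        · left
          rw [List.count_cons_self]
          push_cast at h ⊢
          omega
        · right
          exact ⟨v, List.mem_cons_of_mem _ hv, hvd,
            by rw [List.count_cons, if_neg (by simpa using Ne.symm hvd)]; omega⟩
      · rintro (h | ⟨v, hv, hvd, hc⟩)
        · left
          rw [List.count_cons_self] at h
          push_cast at h ⊢
          omega
        · right
          rcases List.mem_cons.mp hv with h' | h'
          · exact absurd h' hvd
          · refine ⟨v, h', hvd, ?_⟩
            rw [List.count_cons, if_neg (by simpa using Ne.symm hvd)] at hc
            omega
    · have hpd : p < d := lt_of_le_of_ne (hlb d List.mem_cons_self) (Ne.symm hdp)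
      have hpnot : p ∉ d :: rest := by
        intro hmem
        rcases List.mem_cons.mp hmem with h' | h'
        · omega
        · exact absurd (hs.1 p h') (by omega)
      have hcnt0 : (d :: rest).count p = 0 := List.count_eq_zero.mpr hpnot
      rw [runA, if_neg (by simpa using fun h => hdp h)]
      by_cases hc2 : c = 2
      · rw [if_pos (by simp [hc2])]
        symm
        rw [decide_eq_true_iff]
        left
        rw [hcnt0]
        omega
      · rw [if_neg (by simp [hc2])]
        rw [ih d 1 hs.2 hs.1]
        rw [decide_eq_decide]
        rw [hcnt0]
        have hcc : ¬ ((0 : Int) + c = 2) := by omega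
        constructor
        · rintro (h | ⟨v, hv, hvd, hc⟩)
          · right
            exact ⟨d, List.mem_cons_self, by omega,
              by rw [List.count_cons_self]; omega⟩
          · right
            refine ⟨v, List.mem_cons_of_mem _ hv, fun hvp => hpnot (hvp ▸ List.mem_cons_of_mem _ hv), ?_⟩
            rw [List.count_cons, if_neg (by simpa using Ne.symm hvd)]
            omega
        · rintro (h | ⟨v, hv, _, hc⟩)
          · exact absurd h hcc
          · rcases List.mem_cons.mp hv with rfl | h'
            · left
              rw [List.count_cons_self] at hc
              omega
            · by_cases hvd : v = d
              · left
                subst hvd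
                rw [List.count_cons_self] at hc
                omega
              · right
                refine ⟨v, h', hvd, ?_⟩
                rw [List.count_cons, if_neg (by simpa using Ne.symm hvd)] at hc
                omega

-- on a non-decreasing list the run machine answers "some digit occurs exactly twice"
lemma runA_sorted (ds : List Int) (hs : ds.Pairwise (· ≤ ·)) :
    runA ds none 0 = decide (∃ v ∈ ds, ds.count v = 2) := by
  cases ds with
  | nil => simp [runA]
  | cons d rest =>
    rw [List.pairwise_cons] at hs
    rw [runA, if_neg (by simp), if_neg (by simp)]
    rw [runA_inv rest d 1 hs.2 hs.1]
    rw [decide_eq_decide, count2_cons]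
    constructor
    · rintro (h | h)
      · left; omega
      · right; exact h
    · rintro (h | h)
      · left; omega
      · right; exact h

-- B's any-test answers the same question
lemma anyCount_eq (ds : List Int) :
    ds.any (fun d => PySem.List.count ds d == 2) = decide (∃ v ∈ ds, ds.count v = 2) := by
  by_cases h : ∃ v ∈ ds, ds.count v = 2
  · rw [decide_eq_true h]
    rcases h with ⟨v, hv, hc⟩
    rw [List.any_eq_true]
    exact ⟨v, hv, by rw [PySem.List.count_eq, hc]; rfl⟩
  · rw [decide_eq_false h]
    rw [List.any_eq_false]
    intro v hv
    simp only [PySem.List.count_eq, beq_iff_eq]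
    exact fun hc => h ⟨v, hv, hc⟩

-- the two bodies agree on EVERY digit list
lemma body_eq (ds : List Int) :
    (if (PySem.List.pyRange 0 (PySem.List.len ds - 1)).any
        (fun i => decide (PySem.List.pyGetD ds i 0 > PySem.List.pyGetD ds (i + 1) 0))
      then false else runA ds none 0)
    = (if ds ≠ PySem.List.sorted ds (fun x => x) then false
       else ds.any (fun d => PySem.List.count ds d == 2)) := by
  by_cases hp : ds.Pairwise (· ≤ ·)
  · rw [(gateA_eq_false_iff ds).mpr hp]
    simp only [Bool.false_eq_true, if_false]
    have hsort := (sortedGate ds).mpr hp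
    rw [if_neg (by rw [hsort]; simp)]
    exact (runA_sorted ds hp).trans (anyCount_eq ds).symm
  · have hg : ((PySem.List.pyRange 0 (PySem.List.len ds - 1)).any
        (fun i => decide (PySem.List.pyGetD ds i 0 > PySem.List.pyGetD ds (i + 1) 0))) = true := by
      rcases Bool.eq_false_or_eq_true ((PySem.List.pyRange 0 (PySem.List.len ds - 1)).any
        (fun i => decide (PySem.List.pyGetD ds i 0 > PySem.List.pyGetD ds (i + 1) 0))) with h | h
      · exact h
      · exact absurd ((gateA_eq_false_iff ds).mp h) hp
    rw [hg]
    have hneq : ds ≠ PySem.List.sorted ds (fun x => x) := fun h => hp ((sortedGate ds).mp h.symm)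
    rw [if_pos hneq]
    simp

-- ===== VERDICT (by name: the statement is the Claim_ definition above) =====
theorem is_true_password_spec : Claim_equal_is_true_password := by
  intro number _ _
  unfold Spec_is_true_password is_true_password is_true_password_alt
  exact body_eq (pvDigits number)
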